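-- pv_equiv track=rewrite | github.com/zpeats/50863_ABR_Lab | studentEx/studentcodeEXBB.py | prevmatch
-- ===== SOURCE A (Python) =====
-- def prevmatch(value, list_of_list):
--     for e in list_of_list:
--         if value == e[1]:
--             return e
--     value = max(i[1] for i in list_of_list)
--     for e in list_of_list:
--         if value == e[1]:
--             return e
-- ===== SOURCE B (Python) =====
-- def prevmatch(value, list_of_list):
--     # Single pass: return immediately on a matching second field, otherwise
--     # keep the first element seen with the strictly greatest second field.
--     best = None
--     for e in list_of_list:
--         if value == e[1]:
--             return e
--         if best is None or e[1] > best[1]: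
--             best = e
--     if best is None:
--         raise ValueError("prevmatch() of empty sequence")
--     return best
-- ===== Notes on version B (the rewrite author's own statement) =====
-- stated objective: simpler
-- what changed: Replaced A's two-pass scheme (scan for a match, then max() over all second fields, then rescan for the first element attaining it) by one pass that returns on a match and otherwise tracks the first element with the strictly greatest second field.
import Mathlib
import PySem

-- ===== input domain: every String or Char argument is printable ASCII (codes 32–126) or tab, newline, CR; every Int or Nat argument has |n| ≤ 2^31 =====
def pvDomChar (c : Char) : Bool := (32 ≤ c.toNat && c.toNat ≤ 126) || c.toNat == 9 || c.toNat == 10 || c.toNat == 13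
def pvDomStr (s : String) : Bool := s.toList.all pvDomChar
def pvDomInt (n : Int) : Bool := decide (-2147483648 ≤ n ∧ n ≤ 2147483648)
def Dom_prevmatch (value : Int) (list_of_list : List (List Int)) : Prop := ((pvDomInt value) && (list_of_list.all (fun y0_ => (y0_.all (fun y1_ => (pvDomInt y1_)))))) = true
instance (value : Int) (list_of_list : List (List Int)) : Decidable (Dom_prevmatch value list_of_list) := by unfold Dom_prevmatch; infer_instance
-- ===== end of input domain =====

-- ===== PORT A =====
-- B replaces A's two-pass scheme by one pass tracking the first strict maximum; same return value on Pre_.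
-- second field e[1] (outside Pre_ the Python raises; the port uses a default there)
def pvSec (e : List Int) : Int := (PySem.List.pyGet? e 1).getD 0

-- A's scan loop: first e with value == e[1]
def pvFind (value : Int) (l : List (List Int)) : Option (List Int) :=
  match l with
  | [] => none
  | e :: r => if value = pvSec e then some e else pvFind value r

def prevmatch (value : Int) (list_of_list : List (List Int)) : List Int :=
  match pvFind value list_of_list with
  | some e => e
  | none =>
    let m := (PySem.List.max? (list_of_list.map pvSec) (fun y => y)).getD 0
    (pvFind m list_of_list).getD []

-- ===== PORT B =====
-- single pass: return on match, else keep first element with strictly greatest second field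
def pvBestLoop (value : Int) (l : List (List Int)) (best : Option (List Int)) : Option (List Int) :=
  match l with
  | [] => best
  | e :: r =>
    if value = pvSec e then some e
    else match best with
      | none => pvBestLoop value r (some e)
      | some b => if pvSec e > pvSec b then pvBestLoop value r (some e) else pvBestLoop value r best

def prevmatch_alt (value : Int) (list_of_list : List (List Int)) : List Int :=
  (pvBestLoop value list_of_list none).getD []   -- B raises ValueError when best is None (empty list): outside Pre_

-- ===== PRECONDITION & SPEC =====
-- Pre_ excludes exactly the inputs on which Python A raises: the empty list (max() raises ValueError)
-- and lists where some element reached before the first match has no index 1 (e[1] raises IndexError).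
def Pre_prevmatch (value : Int) (list_of_list : List (List Int)) : Prop :=
  list_of_list ≠ [] ∧
    ∀ i : Fin list_of_list.length,
      (∀ j : Fin list_of_list.length, j.1 < i.1 → value ≠ pvSec list_of_list[j]) →
      2 ≤ (list_of_list[i]).length
instance (value : Int) (list_of_list : List (List Int)) : Decidable (Pre_prevmatch value list_of_list) := by unfold Pre_prevmatch; infer_instance

def pvWitness_prevmatch : Int × List (List Int) := (5, [[1, 2], [3, 7], [4, 7]])

def Spec_prevmatch (value : Int) (list_of_list : List (List Int)) (out : List Int) : Prop := out = prevmatch_alt value list_of_list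
instance (value : Int) (list_of_list : List (List Int)) (out : List Int) : Decidable (Spec_prevmatch value list_of_list out) := by unfold Spec_prevmatch; infer_instance

-- ===== CLAIM (what is proved, stated in full; the proofs are below) =====
def Claim_equal_prevmatch : Prop := ∀ (value : Int) (list_of_list : List (List Int)), Dom_prevmatch value list_of_list → Pre_prevmatch value list_of_list → Spec_prevmatch value list_of_list (prevmatch value list_of_list)

-- ===== LEMMAS AND PROOFS =====
-- the pure "first strict maximum" fold B maintains
def pvMf (x : List Int) (l : List (List Int)) : List Int :=
  match l with
  | [] => x
  | e :: r => pvMf (if pvSec e > pvSec x then e else x) r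

theorem pvMf_mono (l : List (List Int)) (x : List Int) : pvSec x ≤ pvSec (pvMf x l) := by
  induction l generalizing x with
  | nil => simp [pvMf]
  | cons e r ih =>
    simp only [pvMf]
    split
    · exact le_trans (le_of_lt (by omega)) (ih e)
    · exact ih x

-- if a match exists, B returns it whatever the accumulator is
theorem pvBestLoop_match (value : Int) (l : List (List Int)) (e : List Int)
    (h : pvFind value l = some e) (b : Option (List Int)) : pvBestLoop value l b = some e := by
  induction l generalizing b with
  | nil => simp [pvFind] at h
  | cons x r ih =>
    simp only [pvFind] at h
    simp only [pvBestLoop]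
    by_cases hx : value = pvSec x
    · rw [if_pos hx] at h ⊢; exact h
    · rw [if_neg hx] at h
      rw [if_neg hx]
      cases b <;> simp [ih h]

-- with no match, B's loop computes the first strict maximum
theorem pvBestLoop_nomatch (value : Int) (l : List (List Int))
    (h : pvFind value l = none) (x : List Int) : pvBestLoop value l (some x) = some (pvMf x l) := by
  induction l generalizing x with
  | nil => simp [pvBestLoop, pvMf]
  | cons e r ih =>
    simp only [pvFind] at h
    by_cases hx : value = pvSec e
    · simp [hx] at h
    · rw [if_neg hx] at h
      simp only [pvBestLoop, pvMf, if_neg hx]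
      split <;> rename_i hc
      · exact ih h e
      · exact ih h x

-- A's max() equals the second field of the first strict maximum
theorem pvMax_eq (l : List (List Int)) (x : List Int) :
    (l.map pvSec).foldl max (pvSec x) = pvSec (pvMf x l) := by
  induction l generalizing x with
  | nil => simp [pvMf]
  | cons e r ih =>
    simp only [List.map, List.foldl, pvMf]
    rw [show max (pvSec x) (pvSec e) = pvSec (if pvSec e > pvSec x then e else x) by
      split <;> omega]
    exact ih _

-- the accumulator never exceeds the result only via strict increases: mf x l = x or sec x < sec (mf x l)
theorem pvMf_strict (l : List (List Int)) (x : List Int) :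
    pvMf x l = x ∨ pvSec x < pvSec (pvMf x l) := by
  induction l generalizing x with
  | nil => simp [pvMf]
  | cons e r ih =>
    simp only [pvMf]
    split <;> rename_i hc
    · right; exact lt_of_lt_of_le hc (pvMf_mono r e)
    · exact ih x

-- A's second scan, looking up the first element with the max second field, finds exactly pvMf
theorem pvFind_mf (l : List (List Int)) (x : List Int) :
    pvFind (pvSec (pvMf x l)) (x :: l) = some (pvMf x l) := by
  induction l generalizing x with
  | nil => simp [pvMf, pvFind]
  | cons e r ih =>
    simp only [pvMf]
    split <;> rename_i hc
    · have hlt : pvSec x < pvSec (pvMf e r) := lt_of_lt_of_le hc (pvMf_mono r e)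
      have := ih e
      simp only [pvFind] at this ⊢
      rw [if_neg (by omega)]
      exact this
    · have hx : pvSec e ≤ pvSec x := by omega
      have := ih x
      simp only [pvFind] at this ⊢
      by_cases hm : pvSec (pvMf x r) = pvSec x
      · rcases pvMf_strict r x with he | he
        · simp [he]
        · omega
      · have hxle : pvSec x ≤ pvSec (pvMf x r) := pvMf_mono r x
        rw [if_neg hm] at this
        rw [if_neg hm, if_neg (by omega)]
        exact this

-- ===== VERDICT (by name: the statement is the Claim_ definition above) =====
theorem prevmatch_spec : Claim_equal_prevmatch := by
  intro value l _ hpre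
  unfold Spec_prevmatch prevmatch prevmatch_alt
  cases hf : pvFind value l with
  | some e => rw [pvBestLoop_match value l e hf none]; simp
  | none =>
    obtain ⟨hne, -⟩ := hpre
    cases l with
    | nil => exact absurd rfl hne
    | cons x r =>
      simp only [pvFind] at hf
      have hx : ¬ value = pvSec x := by intro h; simp [h] at hf
      rw [if_neg hx] at hf
      simp only [pvBestLoop, if_neg hx]
      rw [pvBestLoop_nomatch value r hf x]
      simp only [List.map]
      rw [PySem.List.max?_id_cons]
      simp only [Option.getD_some]
      rw [pvMax_eq r x, pvFind_mf r x]
      simp
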